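-- pv_equiv track=rewrite | github.com/hutchutchutch/learntrac | learntrac-api/src/pdf_processing/fallback_chunker.py | _get_word_before
-- ===== SOURCE A (Python) =====
-- from typing import List, Dict, Optional, Tuple, Set
--
-- def _get_word_before(text: str, pos: int) -> Optional[str]:
--     """Get the word immediately before the given position"""
--     # Look backwards for word boundary
--     i = pos - 1
--     while i >= 0 and not text[i].isalpha():
--         i -= 1
--
--     if i < 0:
--         return None
--
--     # Find start of word
--     word_end = i + 1
--     while i >= 0 and (text[i].isalpha() or text[i] in '.-'):
--         i -= 1
--
--     word_start = i + 1
--     return text[word_start:word_end]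
-- ===== SOURCE B (Python) =====
-- def _get_word_before(text, pos):
--     """Get the word immediately before the given position.
--
--     One forward pass over text[:pos]: keep the start of the current run of
--     word characters (letters, '.', '-') and the best (start, end) span whose
--     end is just past the most recent letter seen.
--     """
--     run_start = 0
--     best = None
--     for i, c in enumerate(text[:max(pos, 0)]):
--         if c.isalpha():
--             best = (run_start, i + 1)
--         elif c != '.' and c != '-':
--             run_start = i + 1
--     if best is None:
--         return None
--     return text[best[0]:best[1]]
-- ===== Notes on version B (the rewrite author's own statement) =====
-- stated objective: alternative
-- what changed: A scans backwards from pos with two while-loops (skip non-letters, then extend left through letters/'.'/'-'); B makes one forward pass over text[:max(pos,0)] maintaining the start of the current word-character run and the span ending just past the most recent letter, then slices once.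
import Mathlib
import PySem

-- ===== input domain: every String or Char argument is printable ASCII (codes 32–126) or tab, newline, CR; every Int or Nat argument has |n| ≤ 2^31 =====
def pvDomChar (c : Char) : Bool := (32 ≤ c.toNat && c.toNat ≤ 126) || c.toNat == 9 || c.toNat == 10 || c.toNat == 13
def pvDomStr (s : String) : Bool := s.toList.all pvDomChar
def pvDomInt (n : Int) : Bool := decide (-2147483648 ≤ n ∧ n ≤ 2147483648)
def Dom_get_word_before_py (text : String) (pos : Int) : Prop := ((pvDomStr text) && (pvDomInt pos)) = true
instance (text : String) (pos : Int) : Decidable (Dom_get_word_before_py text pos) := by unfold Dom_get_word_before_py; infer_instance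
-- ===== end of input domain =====

-- B replaces A's two backward while-loops by one forward pass over the prefix text[:max(pos,0)]
-- that tracks the current run of word characters and the span ending at the most recent letter.

-- ===== PORT A =====
-- first while-loop: i = pos-1; while i >= 0 and not text[i].isalpha(): i -= 1
-- (pyGetD with a dummy default: Pre_ guarantees every accessed index is in range)
def aFindAlpha (cs : List Char) (i : Int) : Int :=
  if h : 0 ≤ i ∧ PySem.Chars.isalpha (PySem.List.pyGetD cs i ' ') = false then
    aFindAlpha cs (i - 1)
  else i
termination_by (i + 1).toNat
decreasing_by omega

-- second while-loop: while i >= 0 and (text[i].isalpha() or text[i] in '.-'): i -= 1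
-- ('c in ".-"' for the single char c is ported as c = '.' ∨ c = '-'; exact)
def aFindStart (cs : List Char) (i : Int) : Int :=
  if h : 0 ≤ i ∧ (PySem.Chars.isalpha (PySem.List.pyGetD cs i ' ')
                    || decide (PySem.List.pyGetD cs i ' ' = '.')
                    || decide (PySem.List.pyGetD cs i ' ' = '-')) = true then
    aFindStart cs (i - 1)
  else i
termination_by (i + 1).toNat
decreasing_by omega

-- the code after the first loop: 'if i < 0: return None' and the slice
def aTail (cs : List Char) (i : Int) : Option String :=
  if i < 0 then none
  else
    let word_end := i + 1
    let word_start := aFindStart cs i + 1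
    some (String.ofList (PySem.List.slice cs (some word_start) (some word_end)))

def get_word_before_py (text : String) (pos : Int) : Option String :=
  aTail text.toList (aFindAlpha text.toList (pos - 1))

-- ===== PORT B =====
-- loop body of Source B: state = (run_start, best)
def bStep (s : Int × Option (Int × Int)) (ic : Int × Char) : Int × Option (Int × Int) :=
  if PySem.Chars.isalpha ic.2 then (s.1, some (s.1, ic.1 + 1))
  else if ic.2 ≠ '.' ∧ ic.2 ≠ '-' then (ic.1 + 1, s.2)
  else s

def get_word_before_py_alt (text : String) (pos : Int) : Option String :=
  let cs := text.toList
  let st := (PySem.List.enumerate (PySem.List.slice cs none (some (max pos 0))) 0).foldl bStep (0, none)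
  match st.2 with
  | none => none
  | some (a, b) => some (String.ofList (PySem.List.slice cs (some a) (some b)))

-- ===== PRECONDITION & SPEC =====
-- Pre_ excludes exactly the inputs where A raises IndexError: pos > len(text)
def Pre_get_word_before_py (text : String) (pos : Int) : Prop := pos ≤ (text.toList.length : Int)
instance (text : String) (pos : Int) : Decidable (Pre_get_word_before_py text pos) := by
  unfold Pre_get_word_before_py; infer_instance
def pvWitness_get_word_before_py : String × Int := ("a.b c", 5)

def Spec_get_word_before_py (text : String) (pos : Int) (out : Option String) : Prop := out = get_word_before_py_alt text pos
instance (text : String) (pos : Int) (out : Option String) : Decidable (Spec_get_word_before_py text pos out) := by unfold Spec_get_word_before_py; infer_instance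

-- ===== CLAIM (what is proved, stated in full; the proofs are below) =====
def Claim_equal_get_word_before_py : Prop := ∀ (text : String) (pos : Int), Dom_get_word_before_py text pos → Pre_get_word_before_py text pos → Spec_get_word_before_py text pos (get_word_before_py text pos)

-- ===== LEMMAS AND PROOFS =====

-- word-character class (letters, '.', '-')
def clsB (c : Char) : Bool := PySem.Chars.isalpha c || decide (c = '.') || decide (c = '-')

-- length of the maximal clsB-prefix of a REVERSED prefix (= run length ending at the right)
def suffR : List Char → Nat
  | [] => 0
  | c :: r => if clsB c then suffR r + 1 else 0

-- (word_start, word_end) of A, computed on the reversed prefix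
def specR : List Char → Option (Nat × Nat)
  | [] => none
  | c :: r => if PySem.Chars.isalpha c then some (r.length + 1 - suffR (c :: r), r.length + 1)
              else specR r

def outOf (cs : List Char) : Option (Nat × Nat) → Option String
  | none => none
  | some (a, b) => some (String.ofList ((cs.drop a).take (b - a)))

lemma suffR_le (r : List Char) : suffR r ≤ r.length := by
  induction r with
  | nil => simp [suffR]
  | cons c r ih => simp only [suffR, List.length_cons]; split <;> omega

lemma take_succ_rev (cs : List Char) (n : Nat) (h : n < cs.length) :
    (cs.take (n+1)).reverse = cs[n] :: (cs.take n).reverse := by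
  rw [List.take_add_one, List.getElem?_eq_getElem h]
  simp

lemma pyGetD_nat (cs : List Char) (n : Nat) (h : n < cs.length) :
    PySem.List.pyGetD cs ((n : Nat) : Int) ' ' = cs[n] := by
  rw [PySem.List.pyGetD_natCast]
  exact List.getD_eq_getElem cs ' ' h

lemma aFindStart_neg (cs : List Char) (i : Int) (h : i < 0) : aFindStart cs i = i := by
  rw [aFindStart, dif_neg]
  rintro ⟨h1, -⟩; omega

lemma aFindStart_step (cs : List Char) (j : Nat) (h : j < cs.length) :
    aFindStart cs (j : Int) = if clsB cs[j] then aFindStart cs ((j : Int) - 1) else (j : Int) := by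
  rw [aFindStart]
  by_cases hc : clsB cs[j] = true
  · rw [dif_pos ⟨by positivity, by rw [pyGetD_nat cs j h]; exact hc⟩, if_pos hc]
  · rw [dif_neg, if_neg hc]
    rintro ⟨-, hcl⟩; rw [pyGetD_nat cs j h] at hcl; exact hc hcl

lemma aFindAlpha_neg (cs : List Char) (i : Int) (h : i < 0) : aFindAlpha cs i = i := by
  rw [aFindAlpha, dif_neg]
  rintro ⟨h1, -⟩; omega

lemma aFindAlpha_step (cs : List Char) (n : Nat) (h : n < cs.length) :
    aFindAlpha cs (n : Int) =
      if PySem.Chars.isalpha cs[n] then (n : Int) else aFindAlpha cs ((n : Int) - 1) := by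
  rw [aFindAlpha]
  by_cases ha : PySem.Chars.isalpha cs[n] = true
  · rw [dif_neg, if_pos ha]
    rintro ⟨-, hcl⟩; rw [pyGetD_nat cs n h] at hcl; rw [ha] at hcl; exact absurd hcl (by decide)
  · rw [dif_pos ⟨by positivity, by rw [pyGetD_nat cs n h]; simp [ha]⟩, if_neg ha]

lemma aFindStart_eq (cs : List Char) (j : Nat) (h : j < cs.length) :
    aFindStart cs (j : Int) = (j : Int) - (suffR ((cs.take (j+1)).reverse) : Int) := by
  induction j with
  | zero =>
    rw [aFindStart_step cs 0 h, take_succ_rev cs 0 h]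
    by_cases hc : clsB cs[0] = true
    · rw [if_pos hc, aFindStart_neg cs _ (by norm_num)]
      simp [suffR, hc]
    · rw [if_neg hc]
      simp [suffR, hc]
  | succ j ih =>
    rw [aFindStart_step cs (j+1) h, take_succ_rev cs (j+1) h]
    by_cases hc : clsB cs[j+1] = true
    · rw [if_pos hc]
      have hcast : (((j+1 : Nat)) : Int) - 1 = (j : Int) := by push_cast; ring
      rw [hcast, ih (by omega)]
      simp only [suffR, hc, if_pos]
      push_cast; ring
    · rw [if_neg hc]
      simp [suffR, hc]

lemma aSide_eq (cs : List Char) (n : Nat) (h : n ≤ cs.length) :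
    aTail cs (aFindAlpha cs ((n : Int) - 1)) = outOf cs (specR ((cs.take n).reverse)) := by
  induction n with
  | zero =>
    rw [aFindAlpha_neg cs _ (by norm_num)]
    simp [aTail, specR, outOf]
  | succ n ih =>
    have hn : n < cs.length := by omega
    have hcast : ((n+1 : Nat) : Int) - 1 = (n : Int) := by push_cast; ring
    rw [hcast, take_succ_rev cs n hn, aFindAlpha_step cs n hn]
    by_cases ha : PySem.Chars.isalpha cs[n] = true
    · rw [if_pos ha]
      have hstart := aFindStart_eq cs n hn
      rw [take_succ_rev cs n hn] at hstart
      have hsuff : suffR (cs[n] :: (cs.take n).reverse) ≤ n + 1 := by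
        have h1 := suffR_le (cs[n] :: (cs.take n).reverse)
        simp at h1; omega
      unfold aTail
      rw [if_neg (by omega), hstart]
      have hlen : ((cs.take n).reverse).length = n := by simp; omega
      simp only [specR, ha, if_pos, outOf, hlen]
      congr 1
      have h1 : (n : Int) - (suffR (cs[n] :: (cs.take n).reverse) : Int) + 1
          = ((n + 1 - suffR (cs[n] :: (cs.take n).reverse) : Nat) : Int) := by omega
      have h2 : (n : Int) + 1 = ((n + 1 : Nat) : Int) := by push_cast; ring
      rw [h1, h2, PySem.List.slice_natCast]
    · rw [if_neg ha, ih (by omega)]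
      simp [specR, ha]

lemma bFold (p : List Char) :
    (PySem.List.enumerate p 0).foldl bStep (0, none) =
      ((p.length : Int) - (suffR p.reverse : Int),
       (specR p.reverse).map (fun ab => ((ab.1 : Int), (ab.2 : Int)))) := by
  induction p using List.reverseRecOn with
  | nil => simp [PySem.List.enumerate_nil, suffR, specR]
  | append_singleton p c ih =>
    rw [PySem.List.enumerate_append, List.foldl_append, ih]
    have hsl : suffR p.reverse ≤ p.length := by
      have h1 := suffR_le p.reverse; simpa using h1
    simp only [List.reverse_append, List.reverse_cons, List.reverse_nil, List.nil_append,
      List.singleton_append, List.length_append, List.length_cons, List.length_nil]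
    simp only [PySem.List.enumerate_cons, PySem.List.enumerate_nil, List.foldl_cons, List.foldl_nil]
    by_cases ha : PySem.Chars.isalpha c = true
    · have hcls : clsB c = true := by simp [clsB, ha]
      simp only [bStep, ha, if_pos, specR, suffR, hcls, List.length_reverse]
      refine Prod.ext ?_ ?_
      · push_cast; omega
      · simp only [Option.map_some, Option.some.injEq, Prod.mk.injEq]
        constructor <;> push_cast <;> omega
    · by_cases hc : c = '.' ∨ c = '-'
      · have hcls : clsB c = true := by rcases hc with h | h <;> simp [clsB, h]
        have hne : ¬ (c ≠ '.' ∧ c ≠ '-') := by tauto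
        simp only [bStep, if_neg ha, if_neg hne, specR, suffR, hcls, if_pos, List.length_reverse]
        refine Prod.ext ?_ ?_
        · push_cast; omega
        · rfl
      · have hcls : clsB c = false := by
          rw [not_or] at hc; simp [clsB, ha, hc.1, hc.2]
        have hyes : (c ≠ '.' ∧ c ≠ '-') := by tauto
        simp only [bStep, if_neg ha, if_pos hyes, specR, suffR, hcls, List.length_reverse]
        refine Prod.ext ?_ ?_
        · simp only [Bool.false_eq_true, if_false]
          push_cast; omega
        · rfl

-- ===== VERDICT (by name: the statement is the Claim_ definition above) =====
lemma bSide_eq (text : String) (n : Nat) :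
    get_word_before_py_alt text ((n : Nat) : Int) = outOf text.toList (specR ((text.toList.take n).reverse)) := by
  unfold get_word_before_py_alt
  have hmax : max ((n : Nat) : Int) 0 = ((n : Nat) : Int) := by omega
  rw [hmax]
  simp only [PySem.List.slice_to_natCast]
  rw [bFold]
  cases hs : specR ((text.toList.take n).reverse) with
  | none => simp [outOf]
  | some ab =>
    obtain ⟨a, b⟩ := ab
    simp [outOf, PySem.List.slice_natCast]

theorem get_word_before_py_spec : Claim_equal_get_word_before_py := by
  intro text pos _ hpre
  unfold Spec_get_word_before_py
  unfold Pre_get_word_before_py at hpre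
  by_cases h0 : 0 ≤ pos
  · have hn : pos = ((pos.toNat : Nat) : Int) := by omega
    have hnl : pos.toNat ≤ text.toList.length := by omega
    rw [hn, bSide_eq text pos.toNat]
    unfold get_word_before_py
    exact aSide_eq text.toList pos.toNat hnl
  · have h0' : pos < 0 := by omega
    unfold get_word_before_py get_word_before_py_alt
    rw [aFindAlpha, dif_neg (by omega)]
    have hT : aTail text.toList (pos - 1) = none := by
      unfold aTail; rw [if_pos (by omega)]
    rw [hT]
    have hmax : max pos 0 = ((0 : Nat) : Int) := by omega
    rw [hmax]
    simp only [PySem.List.slice_to_natCast]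
    simp [PySem.List.enumerate_nil]
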